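-- pv_equiv track=rewrite | github.com/manish17salian/Programming | DataStructures/SlidingWindow/IMP_CountSubArrKOnes.py | subarrayWithSum
-- ===== SOURCE A (Python) =====
-- from typing import List
--
-- def subarrayWithSum(arr: List[int], k: int) -> int:
--     left = 0
--     count = 0
--     res = 0
--
--     for right in range(len(arr)):
--         if arr[right] == 1:
--             count+=1
--
--         while count > k:
--             if arr[left] == 1:
--                 count-=1
--             left+=1
--
--         if count == k:
--             temp = left
--             while temp <=right and count == k:
--                 res+=1
--                 if arr[temp] == 1:
--                     break
--                 temp+=1
--
--     return res
-- ===== SOURCE B (Python) =====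
-- from typing import List
--
-- def subarrayWithSum(arr: List[int], k: int) -> int:
--     freq = {0: 1}
--     prefix = 0
--     res = 0
--     for x in arr:
--         if x == 1:
--             prefix += 1
--         res += freq.get(prefix - k, 0)
--         freq[prefix] = freq.get(prefix, 0) + 1
--     return res
-- ===== Notes on version B (the rewrite author's own statement) =====
-- stated objective: alternative
-- what changed: Replaces A's sliding window with a per-position inner rescan (the while-temp loop) by a single pass that counts prefix-one-sums in a hashmap and adds freq[prefix-k] at each element.
import Mathlib
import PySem

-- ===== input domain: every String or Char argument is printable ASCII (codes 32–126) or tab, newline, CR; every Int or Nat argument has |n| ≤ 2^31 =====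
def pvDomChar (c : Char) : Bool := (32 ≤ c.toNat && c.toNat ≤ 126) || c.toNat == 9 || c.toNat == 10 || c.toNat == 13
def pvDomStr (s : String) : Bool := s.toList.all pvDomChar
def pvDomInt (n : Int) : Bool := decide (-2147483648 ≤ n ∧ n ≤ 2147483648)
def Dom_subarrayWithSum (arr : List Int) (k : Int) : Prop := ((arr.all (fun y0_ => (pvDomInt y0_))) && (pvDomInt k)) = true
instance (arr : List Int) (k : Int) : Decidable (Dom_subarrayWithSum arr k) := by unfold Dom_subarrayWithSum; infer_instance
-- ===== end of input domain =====

-- B replaces A's sliding window with inner rescans by a one-pass prefix-count hashmap; equal on all inputs where A returns.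

-- ===== PORT A =====
-- the `while count > k` loop: advances `left`, dropping ones; the `none` branch marks Python's
-- IndexError when `left` runs past the end (reachable only for k < 0, excluded by Pre_)
def pvDropLoop (arr : List Int) (k : Int) (left : Nat) (count : Int) : Nat × Int :=
  if count > k then
    match h : arr[left]? with
    | none => (left, count)   -- Python raises IndexError here (outside Pre_)
    | some v => pvDropLoop arr k (left + 1) (if v = 1 then count - 1 else count)
  else (left, count)
termination_by arr.length - left
decreasing_by
  obtain ⟨hlt, -⟩ := List.getElem?_eq_some_iff.mp h
  omega

-- the `while temp <= right and count == k` loop (count never changes inside it)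
def pvResLoop (arr : List Int) (k : Int) (right temp : Nat) (count res : Int) : Int :=
  if temp ≤ right ∧ count = k then
    match arr[temp]? with
    | none => res + 1            -- Python raises after res += 1; unreachable: temp ≤ right < len
    | some v => if v = 1 then res + 1 else pvResLoop arr k right (temp + 1) count (res + 1)
  else res
termination_by right + 1 - temp
decreasing_by omega

def pvStepA (arr : List Int) (k : Int) (st : Nat × Int × Int) (right : Nat) : Nat × Int × Int :=
  let count := if arr[right]? = some 1 then st.2.1 + 1 else st.2.1
  let lc := pvDropLoop arr k st.1 count
  let res := if lc.2 = k then pvResLoop arr k right lc.1 lc.2 st.2.2 else st.2.2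
  (lc.1, lc.2, res)

def subarrayWithSum (arr : List Int) (k : Int) : Int :=
  ((List.range arr.length).foldl (pvStepA arr k) (0, 0, 0)).2.2

-- ===== PORT B =====
def pvStepB (k : Int) (st : PySem.Dict Int Int × Int × Int) (x : Int) : PySem.Dict Int Int × Int × Int :=
  let p := if x = 1 then st.2.1 + 1 else st.2.1
  let res := st.2.2 + st.1.getD (p - k) 0
  (st.1.insert p (st.1.getD p 0 + 1), p, res)

def subarrayWithSum_alt (arr : List Int) (k : Int) : Int :=
  (arr.foldl (pvStepB k) (PySem.Dict.ofList [((0 : Int), (1 : Int))], 0, 0)).2.2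

-- ===== PRECONDITION & SPEC =====
-- Pre_ excludes k < 0 with a nonempty arr, exactly where A's `while count > k` loop
-- runs `left` off the end and raises IndexError.
def Pre_subarrayWithSum (arr : List Int) (k : Int) : Prop := 0 ≤ k ∨ arr = []
instance (arr : List Int) (k : Int) : Decidable (Pre_subarrayWithSum arr k) := by unfold Pre_subarrayWithSum; infer_instance

def pvWitness_subarrayWithSum : List Int × Int := ([1, 0, 1, 1, 0], 2)

def Spec_subarrayWithSum (arr : List Int) (k : Int) (out : Int) : Prop := out = subarrayWithSum_alt arr k
instance (arr : List Int) (k : Int) (out : Int) : Decidable (Spec_subarrayWithSum arr k out) := by unfold Spec_subarrayWithSum; infer_instance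

-- ===== CLAIM (what is proved, stated in full; the proofs are below) =====
def Claim_equal_subarrayWithSum : Prop := ∀ (arr : List Int) (k : Int), Dom_subarrayWithSum arr k → Pre_subarrayWithSum arr k → Spec_subarrayWithSum arr k (subarrayWithSum arr k)

-- ===== LEMMAS AND PROOFS =====

-- number of ones among the first n elements
def pvPfx (arr : List Int) (n : Nat) : Int :=
  ((arr.take n).countP (fun x => decide (x = 1)) : Nat)

-- number of subarrays ending at index j (start i ≤ j) with exactly k ones
def pvC (arr : List Int) (k : Int) (j : Nat) : Int :=
  (((Finset.range (j + 1)).filter (fun i => pvPfx arr (j + 1) - pvPfx arr i = k)).card : Nat)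

def pvS (arr : List Int) (k : Int) (n : Nat) : Int :=
  ((List.range n).map (pvC arr k)).sum

lemma pvPfx_zero (arr : List Int) : pvPfx arr 0 = 0 := by simp [pvPfx]

lemma pvPfx_mono (arr : List Int) {i j : Nat} (h : i ≤ j) : pvPfx arr i ≤ pvPfx arr j := by
  unfold pvPfx
  have h1 : arr.take i = (arr.take j).take i := by
    rw [List.take_take, Nat.min_eq_left h]
  rw [h1]
  exact_mod_cast (List.take_sublist i (arr.take j)).countP_le

lemma pvPfx_succ (arr : List Int) {n : Nat} (h : n < arr.length) :
    pvPfx arr (n + 1) = pvPfx arr n + (if arr[n] = 1 then 1 else 0) := by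
  unfold pvPfx
  rw [List.take_add_one, List.countP_append]
  simp [List.getElem?_eq_getElem h, List.countP_cons]

lemma pvS_succ (arr : List Int) (k : Int) (n : Nat) :
    pvS arr k (n + 1) = pvS arr k n + pvC arr k n := by
  simp [pvS, List.range_succ]

-- A-side invariant
def pvInvA (arr : List Int) (k : Int) (n : Nat) (st : Nat × Int × Int) : Prop :=
  st.1 ≤ n ∧ st.2.1 = pvPfx arr n - pvPfx arr st.1 ∧ st.2.1 ≤ k ∧
  (st.1 = 0 ∨ pvPfx arr n - pvPfx arr (st.1 - 1) > k) ∧ st.2.2 = pvS arr k n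

lemma pvDropLoop_spec (arr : List Int) (k : Int) (hk : 0 ≤ k) (n : Nat) (hn : n < arr.length)
    (m : Nat) : ∀ left count, n + 1 - left ≤ m → left ≤ n + 1 →
    count = pvPfx arr (n + 1) - pvPfx arr left →
    left ≤ (pvDropLoop arr k left count).1 ∧ (pvDropLoop arr k left count).1 ≤ n + 1 ∧
    (pvDropLoop arr k left count).2 = pvPfx arr (n + 1) - pvPfx arr (pvDropLoop arr k left count).1 ∧
    (pvDropLoop arr k left count).2 ≤ k ∧
    ((pvDropLoop arr k left count).1 = left ∨
      pvPfx arr (n + 1) - pvPfx arr ((pvDropLoop arr k left count).1 - 1) > k) := by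
  induction m with
  | zero =>
    intro left count hm hle hcnt
    have hl : left = n + 1 := by omega
    have hc0 : count = 0 := by rw [hcnt, hl]; omega
    rw [pvDropLoop, if_neg (by omega)]
    exact ⟨Nat.le_refl _, hle, hcnt, by omega, Or.inl rfl⟩
  | succ m ih =>
    intro left count hm hle hcnt
    by_cases hgt : count > k
    · -- must advance; left < n + 1
      have hlt : left < n + 1 := by
        rcases Nat.lt_or_ge left (n + 1) with h | h
        · exact h
        · exfalso
          have : pvPfx arr (n + 1) ≤ pvPfx arr left := pvPfx_mono arr h
          omega
      have hsome : arr[left]? = some arr[left] := List.getElem?_eq_getElem (by omega)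
      rw [pvDropLoop, if_pos hgt]
      split
      · next heq => rw [hsome] at heq; exact absurd heq (by simp)
      · next v heq =>
        rw [hsome] at heq
        injection heq with hv
        subst hv
        have hcnt' : (if arr[left] = 1 then count - 1 else count) =
            pvPfx arr (n + 1) - pvPfx arr (left + 1) := by
          have := pvPfx_succ arr (show left < arr.length by omega)
          split_ifs with h1 <;> simp [h1] at this <;> omega
        have hres := ih (left + 1) _ (by omega) (by omega) hcnt'
        refine ⟨by omega, hres.2.1, hres.2.2.1, hres.2.2.2.1, ?_⟩
        rcases hres.2.2.2.2 with he | hb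
        · right
          rw [he]
          have h1 : left + 1 - 1 = left := rfl
          rw [h1]
          omega
        · right; exact hb
    · rw [pvDropLoop, if_neg hgt]
      exact ⟨Nat.le_refl _, hle, hcnt, by omega, Or.inl rfl⟩

lemma pvResLoop_spec (arr : List Int) (k : Int) (n : Nat) (hn : n < arr.length)
    (m : Nat) : ∀ temp res, n - temp ≤ m → temp ≤ n →
    pvPfx arr (n + 1) - pvPfx arr temp = k →
    pvResLoop arr k n temp k res =
      res + (((Finset.Ico temp (n + 1)).filter
        (fun i => pvPfx arr (n + 1) - pvPfx arr i = k)).card : Nat) := by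
  induction m with
  | zero =>
    intro temp res hm hle hw
    have ht : temp = n := by omega
    subst ht
    have hsome : arr[temp]? = some arr[temp] := List.getElem?_eq_getElem (by omega)
    have hIco : Finset.Ico temp (temp + 1) = {temp} := by
      ext i; simp; try omega
    have hcard : ((Finset.Ico temp (temp + 1)).filter
        (fun i => pvPfx arr (temp + 1) - pvPfx arr i = k)).card = 1 := by
      rw [hIco, Finset.filter_singleton, if_pos hw, Finset.card_singleton]
    rw [pvResLoop, if_pos ⟨Nat.le_refl _, rfl⟩]
    split
    · next heq => rw [hsome] at heq; exact absurd heq (by simp)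
    · next v heq =>
      rw [hsome] at heq
      injection heq with hv
      subst hv
      by_cases h1 : arr[temp] = 1
      · rw [if_pos h1, hcard]; simp
      · rw [if_neg h1, pvResLoop, if_neg (by omega), hcard]; simp
  | succ m ih =>
    intro temp res hm hle hw
    have hsome : arr[temp]? = some arr[temp] := List.getElem?_eq_getElem (by omega)
    have hIns : Finset.Ico temp (n + 1) = insert temp (Finset.Ico (temp + 1) (n + 1)) := by
      ext i; simp; try omega
    rw [pvResLoop, if_pos ⟨hle, rfl⟩]
    split
    · next heq => rw [hsome] at heq; exact absurd heq (by simp)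
    · next v heq =>
      rw [hsome] at heq
      injection heq with hv
      subst hv
      by_cases h1 : arr[temp] = 1
      · rw [if_pos h1]
        -- dropping the one at temp: every later start sees fewer than k ones
        have hstep : pvPfx arr (temp + 1) = pvPfx arr temp + 1 := by
          have := pvPfx_succ arr (show temp < arr.length by omega)
          simp [h1] at this; omega
        have hempty : (Finset.Ico (temp + 1) (n + 1)).filter
            (fun i => pvPfx arr (n + 1) - pvPfx arr i = k) = ∅ := by
          rw [Finset.filter_eq_empty_iff]
          intro i hi
          rw [Finset.mem_Ico] at hi
          have : pvPfx arr (temp + 1) ≤ pvPfx arr i := pvPfx_mono arr hi.1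
          omega
        rw [hIns, Finset.filter_insert, if_pos hw,
          Finset.card_insert_of_notMem (by simp [hempty]), hempty]
        simp
      · rw [if_neg h1]
        have hmemIco : temp ∉ Finset.Ico (temp + 1) (n + 1) := by simp [Finset.mem_Ico]
        have hcard : ((Finset.Ico temp (n + 1)).filter
              (fun i => pvPfx arr (n + 1) - pvPfx arr i = k)).card
            = ((Finset.Ico (temp + 1) (n + 1)).filter
              (fun i => pvPfx arr (n + 1) - pvPfx arr i = k)).card + 1 := by
          rw [hIns, Finset.filter_insert, if_pos hw,
            Finset.card_insert_of_notMem (fun hmem => hmemIco (Finset.mem_of_mem_filter _ hmem))]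
        have hstep : pvPfx arr (temp + 1) = pvPfx arr temp := by
          have := pvPfx_succ arr (show temp < arr.length by omega)
          simp [h1] at this; omega
        rcases Nat.lt_or_ge temp n with hlt | hge
        · rw [ih (temp + 1) (res + 1) (by omega) (by omega) (by omega), hcard]
          push_cast; ring
        · have ht : temp = n := by omega
          subst ht
          rw [pvResLoop, if_neg (by omega), hcard]
          have hmt : (Finset.Ico (temp + 1) (temp + 1)).filter
              (fun i => pvPfx arr (temp + 1) - pvPfx arr i = k) = ∅ := by simp
          rw [hmt]; simp

lemma pvStepA_inv (arr : List Int) (k : Int) (hk : 0 ≤ k) (n : Nat) (hn : n < arr.length)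
    (left : Nat) (count res : Int) (h : pvInvA arr k n (left, count, res)) :
    pvInvA arr k (n + 1) (pvStepA arr k (left, count, res) n) := by
  obtain ⟨hle, hcnt, hck, hmin, hres⟩ := h
  dsimp only at hle hcnt hck hmin hres
  have hsome : arr[n]? = some arr[n] := List.getElem?_eq_getElem hn
  have hstep := pvPfx_succ arr hn
  simp only [pvStepA, hsome, Option.some.injEq]
  have hcnt1 : (if arr[n] = 1 then count + 1 else count)
      = pvPfx arr (n + 1) - pvPfx arr left := by
    split_ifs with h1 <;> simp [h1] at hstep <;> omega
  rcases hEq : pvDropLoop arr k left (if arr[n] = 1 then count + 1 else count) with ⟨left', count'⟩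
  have hD := pvDropLoop_spec arr k hk n hn (n + 1) left _ (by omega) (by omega) hcnt1
  rw [hEq] at hD
  dsimp only at hD ⊢
  obtain ⟨hd1, hd2, hd3, hd4, hd5⟩ := hD
  unfold pvInvA
  dsimp only
  have hBelow : ∀ i, i < left' → pvPfx arr (n + 1) - pvPfx arr i > k := by
    intro i hi
    rcases hd5 with he | hb
    · rw [he] at hi
      rcases hmin with h0 | hgt
      · omega
      · have h1 : pvPfx arr i ≤ pvPfx arr (left - 1) := pvPfx_mono arr (by omega)
        have h2 : pvPfx arr n ≤ pvPfx arr (n + 1) := pvPfx_mono arr (by omega)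
        omega
    · have h1 : pvPfx arr i ≤ pvPfx arr (left' - 1) := pvPfx_mono arr (by omega)
      omega
  refine ⟨hd2, hd3, hd4, ?_, ?_⟩
  · rcases Nat.eq_zero_or_pos left' with h0 | hpos
    · exact Or.inl h0
    · exact Or.inr (hBelow (left' - 1) (by omega))
  · rw [pvS_succ]
    by_cases hck' : count' = k
    · rw [if_pos hck', hck']
      rcases Nat.lt_or_ge n left' with hbig | hsmall
      · -- left' = n + 1: the res loop exits at once, and no start works
        rw [pvResLoop, if_neg (by omega)]
        have hc0 : pvC arr k n = 0 := by
          unfold pvC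
          norm_cast
          rw [Finset.card_eq_zero, Finset.filter_eq_empty_iff]
          intro i hi
          rw [Finset.mem_range] at hi
          have := hBelow i (by omega)
          omega
        omega
      · rw [pvResLoop_spec arr k n hn n left' res (by omega) hsmall (by omega), hres]
        have hCeq : pvC arr k n = (((Finset.Ico left' (n + 1)).filter
            (fun i => pvPfx arr (n + 1) - pvPfx arr i = k)).card : Nat) := by
          unfold pvC
          norm_cast
          congr 1
          ext i
          simp only [Finset.mem_filter, Finset.mem_range, Finset.mem_Ico]
          constructor
          · rintro ⟨hi, hp⟩
            refine ⟨⟨?_, by omega⟩, hp⟩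
            by_contra hc
            have := hBelow i (by omega)
            omega
          · rintro ⟨⟨ha, hb⟩, hp⟩
            exact ⟨by omega, hp⟩
        omega
    · rw [if_neg hck']
      have hc0 : pvC arr k n = 0 := by
        unfold pvC
        norm_cast
        rw [Finset.card_eq_zero, Finset.filter_eq_empty_iff]
        intro i hi
        rw [Finset.mem_range] at hi
        rcases Nat.lt_or_ge i left' with hlo | hhi
        · have := hBelow i hlo
          omega
        · have : pvPfx arr left' ≤ pvPfx arr i := pvPfx_mono arr hhi
          omega
      omega

lemma pvFoldA_inv (arr : List Int) (k : Int) (hk : 0 ≤ k) (n : Nat) (hn : n ≤ arr.length) :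
    pvInvA arr k n ((List.range n).foldl (pvStepA arr k) (0, 0, 0)) := by
  induction n with
  | zero =>
    exact ⟨Nat.le_refl 0, by simp [pvPfx_zero], hk, Or.inl rfl, by simp [pvS]⟩
  | succ m ih =>
    rw [List.range_succ, List.foldl_append, List.foldl_cons, List.foldl_nil]
    have ih' := ih (by omega)
    rcases hSt : (List.range m).foldl (pvStepA arr k) (0, 0, 0) with ⟨l, c, r⟩
    rw [hSt] at ih'
    exact pvStepA_inv arr k hk m (by omega) l c r ih'

-- B-side invariant
def pvInvB (arr : List Int) (k : Int) (n : Nat) (st : PySem.Dict Int Int × Int × Int) : Prop :=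
  st.2.1 = pvPfx arr n ∧ st.2.2 = pvS arr k n ∧
  ∀ v, st.1.getD v 0 = (((Finset.range (n + 1)).filter (fun i => pvPfx arr i = v)).card : Nat)

lemma pvStepB_inv (arr : List Int) (k : Int) (n : Nat) (hn : n < arr.length)
    (freq : PySem.Dict Int Int) (p res : Int) (h : pvInvB arr k n (freq, p, res)) :
    pvInvB arr k (n + 1) (pvStepB k (freq, p, res) arr[n]) := by
  obtain ⟨hp, hres, hfreq⟩ := h
  dsimp only at hp hres hfreq
  have hstep := pvPfx_succ arr hn
  have hp' : (if arr[n] = 1 then p + 1 else p) = pvPfx arr (n + 1) := by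
    split_ifs with h1 <;> simp [h1] at hstep <;> omega
  unfold pvStepB pvInvB
  dsimp only
  rw [hp']
  refine ⟨rfl, ?_, ?_⟩
  · rw [hres, hfreq, pvS_succ]
    have hCeq : pvC arr k n = (((Finset.range (n + 1)).filter
        (fun i => pvPfx arr i = pvPfx arr (n + 1) - k)).card : Nat) := by
      unfold pvC
      norm_cast
      congr 1
      ext i
      simp only [Finset.mem_filter, Finset.mem_range]
      constructor
      · rintro ⟨hi, hp2⟩; exact ⟨hi, by omega⟩
      · rintro ⟨hi, hp2⟩; exact ⟨hi, by omega⟩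
    omega
  · intro v
    rw [PySem.Dict.getD_insert]
    have hsplit : ((Finset.range (n + 1 + 1)).filter (fun i => pvPfx arr i = v)).card
        = ((Finset.range (n + 1)).filter (fun i => pvPfx arr i = v)).card
          + (if pvPfx arr (n + 1) = v then 1 else 0) := by
      rw [Finset.range_add_one, Finset.filter_insert]
      split_ifs with hv
      · rw [Finset.card_insert_of_notMem (by simp)]
      · rfl
    rw [hsplit]
    by_cases hv : v = pvPfx arr (n + 1)
    · subst hv
      rw [if_pos rfl, if_pos rfl, hfreq]
      push_cast
      ring
    · rw [if_neg hv, if_neg (fun hc => hv hc.symm), hfreq]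
      simp

lemma pvFoldB_inv (arr : List Int) (k : Int) (n : Nat) (hn : n ≤ arr.length) :
    pvInvB arr k n ((arr.take n).foldl (pvStepB k) (PySem.Dict.ofList [((0 : Int), (1 : Int))], 0, 0)) := by
  induction n with
  | zero =>
    simp only [List.take_zero, List.foldl_nil]
    refine ⟨by simp [pvPfx_zero], by simp [pvS], ?_⟩
    intro v
    have h0 : PySem.Dict.ofList [((0 : Int), (1 : Int))] = PySem.Dict.empty.insert 0 1 := rfl
    dsimp only
    rw [h0, PySem.Dict.getD_insert]
    by_cases hv : v = 0
    · subst hv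
      rw [if_pos rfl]
      simp [Finset.filter_singleton, pvPfx_zero]
    · rw [if_neg hv]
      simp [Finset.filter_singleton, pvPfx_zero, Ne.symm hv]
  | succ m ih =>
    have hm : m < arr.length := by omega
    rw [List.take_add_one, List.getElem?_eq_getElem hm]
    simp only [Option.toList_some, List.foldl_append, List.foldl_cons, List.foldl_nil]
    have ih' := ih (by omega)
    rcases hSt : (arr.take m).foldl (pvStepB k) (PySem.Dict.ofList [((0 : Int), (1 : Int))], 0, 0) with ⟨d, p, r⟩
    rw [hSt] at ih'
    exact pvStepB_inv arr k m hm d p r ih'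

lemma pvMain (arr : List Int) (k : Int) (hk : 0 ≤ k) :
    subarrayWithSum arr k = subarrayWithSum_alt arr k := by
  have hA := pvFoldA_inv arr k hk arr.length (Nat.le_refl _)
  have hB := pvFoldB_inv arr k arr.length (Nat.le_refl _)
  rw [List.take_length] at hB
  unfold subarrayWithSum subarrayWithSum_alt
  rw [hA.2.2.2.2, hB.2.1]

-- ===== VERDICT (by name: the statement is the Claim_ definition above) =====
theorem subarrayWithSum_spec : Claim_equal_subarrayWithSum := by
  intro arr k _ hpre
  unfold Spec_subarrayWithSum
  rcases hpre with hk | rfl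
  · exact pvMain arr k hk
  · rfl
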